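-- pv_equiv track=rewrite | github.com/SIDED00R/Code_training | 백준/Gold/32955. 이상한 격자/이상한 격자.py | find
-- ===== SOURCE A (Python) =====
-- def find(l, base, go, back):
--     total = sum([(num - base) * back for num in l])
--     now_total = total
--     for idx, num in enumerate(l):
--         if idx == 0:
--             continue
--         before_node = l[idx - 1]
--         distance = num - before_node
--         now_total = now_total + (distance * idx * go - distance * (len(l) - idx) * back)
--         total = min(total, now_total)
--     return total
-- ===== SOURCE B (Python) =====
-- def find(l, base, go, back):
--     n = len(l)
--     S = sum(l)
--     t0 = back * (S - n * base)
--     best = t0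
--     P = 0  # prefix sum of l[0:k]
--     for k, x in enumerate(l):
--         c = t0 + go * (k * x - P) - back * ((n - k) * x + P - n * l[0])
--         if c < best:
--             best = c
--         P += x
--     return best
-- ===== Notes on version B (the rewrite author's own statement) =====
-- stated objective: alternative
-- what changed: B replaces A's adjacent-difference recurrence (each cost derived from the previous one via distance*(idx*go-(n-idx)*back)) by an Abel-summation closed form: each position's cost is computed independently as t0 + go*(k*l[k]-P) - back*((n-k)*l[k]+P-n*l[0]) from a running prefix sum P, and the minimum is kept.
import Mathlib
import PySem

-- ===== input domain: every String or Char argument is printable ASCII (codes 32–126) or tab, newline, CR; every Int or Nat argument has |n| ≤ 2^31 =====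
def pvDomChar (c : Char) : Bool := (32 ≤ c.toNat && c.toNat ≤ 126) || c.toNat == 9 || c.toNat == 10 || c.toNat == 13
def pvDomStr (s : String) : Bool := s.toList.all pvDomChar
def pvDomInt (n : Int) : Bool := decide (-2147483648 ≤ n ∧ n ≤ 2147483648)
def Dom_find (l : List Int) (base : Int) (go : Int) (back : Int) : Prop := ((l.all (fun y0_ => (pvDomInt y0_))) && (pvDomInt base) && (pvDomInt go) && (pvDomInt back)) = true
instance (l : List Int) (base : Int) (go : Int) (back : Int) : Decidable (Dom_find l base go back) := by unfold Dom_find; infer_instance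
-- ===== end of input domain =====

-- B replaces A's adjacent-difference cost recurrence by an independently computed
-- closed-form cost per position (Abel summation over prefix sums) and takes the minimum (objective: alternative).

-- ===== PORT A =====
-- A's for-loop over enumerate(l) with state (total, now_total);
-- pyGetD is exact here: idx - 1 is always a valid index when idx ≠ 0.
def findGo (l : List Int) (go back : Int) (pairs : List (Int × Int)) (total now : Int) : Int :=
  match pairs with
  | [] => total
  | (idx, num) :: rest =>
    if idx = 0 then findGo l go back rest total now
    else
      let before_node := PySem.List.pyGetD l (idx - 1) 0
      let distance := num - before_node
      let now' := now + (distance * idx * go - distance * ((l.length : Int) - idx) * back)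
      findGo l go back rest (min total now') now'

def find (l : List Int) (base : Int) (go : Int) (back : Int) : Int :=
  let total := (l.map (fun num => (num - base) * back)).sum
  findGo l go back (PySem.List.enumerate l 0) total total

-- ===== PORT B =====
-- Source B's loop over enumerate(l) with state (P, best); l[0] is read inside the
-- loop body exactly as in Source B (pyGetD is exact: index 0 is valid whenever the loop runs).
def altLoop (l : List Int) (t0 n go back : Int) (pairs : List (Int × Int)) (P best : Int) : Int :=
  match pairs with
  | [] => best
  | (k, x) :: rest =>
    let c := t0 + go * (k * x - P) - back * ((n - k) * x + P - n * PySem.List.pyGetD l 0 0)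
    altLoop l t0 n go back rest (P + x) (if c < best then c else best)

def find_alt (l : List Int) (base : Int) (go : Int) (back : Int) : Int :=
  let n : Int := (l.length : Int)
  let S := l.sum
  let t0 := back * (S - n * base)
  altLoop l t0 n go back (PySem.List.enumerate l 0) 0 t0

-- ===== PRECONDITION & SPEC =====
def Spec_find (l : List Int) (base : Int) (go : Int) (back : Int) (out : Int) : Prop := out = find_alt l base go back
instance (l : List Int) (base : Int) (go : Int) (back : Int) (out : Int) : Decidable (Spec_find l base go back out) := by unfold Spec_find; infer_instance

-- ===== CLAIM (what is proved, stated in full; the proofs are below) =====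
def Claim_equal_find : Prop := ∀ (l : List Int) (base : Int) (go : Int) (back : Int), Dom_find l base go back → Spec_find l base go back (find l base go back)

-- ===== LEMMAS AND PROOFS =====

-- B's closed-form cost at position k with prefix sum P (l0 = l[0])
def posCost (t0 n go back l0 k x P : Int) : Int :=
  t0 + go * (k * x - P) - back * ((n - k) * x + P - n * l0)

-- abstract walk over the suffix carrying the previous element, no list indexing
def pairWalk (n go back : Int) (j prev : Int) (xs : List Int) (total now : Int) : Int :=
  match xs with
  | [] => total
  | x :: xs =>
    let d := x - prev
    let now' := now + (d * j * go - d * (n - j) * back)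
    pairWalk n go back (j + 1) x xs (min total now') now'

-- A's loop over the enumerated suffix equals the abstract pair walk
theorem findGo_eq_pairWalk (go back : Int) :
    ∀ (xs pre : List Int) (prev total now : Int),
      findGo (pre ++ prev :: xs) go back
        (PySem.List.enumerate xs ((pre.length : Int) + 1)) total now
      = pairWalk (((pre ++ prev :: xs).length : Int)) go back
          ((pre.length : Int) + 1) prev xs total now := by
  intro xs
  induction xs with
  | nil => intro pre prev total now; simp [PySem.List.enumerate_nil, findGo, pairWalk]
  | cons x xs ih =>
    intro pre prev total now
    rw [PySem.List.enumerate_cons]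
    show findGo (pre ++ prev :: x :: xs) go back
        (((pre.length : Int) + 1, x) :: PySem.List.enumerate xs ((pre.length : Int) + 1 + 1)) total now = _
    rw [findGo]
    have hne : ¬ ((pre.length : Int) + 1 = 0) := by omega
    simp only [hne, if_false]
    have hbefore : PySem.List.pyGetD (pre ++ prev :: x :: xs) ((pre.length : Int) + 1 - 1) 0 = prev := by
      have : (pre.length : Int) + 1 - 1 = ((pre.length : Nat) : Int) := by omega
      rw [this, PySem.List.pyGetD_natCast]
      simp [List.getD]
    rw [hbefore]
    have hre : pre ++ prev :: x :: xs = (pre ++ [prev]) ++ x :: xs := by simp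
    have hlen : ((pre ++ [prev]).length : Int) = (pre.length : Int) + 1 := by simp
    have := ih (pre ++ [prev]) x
      (min total (now + ((x - prev) * ((pre.length : Int) + 1) * go -
        (x - prev) * (((pre ++ prev :: x :: xs).length : Int) - ((pre.length : Int) + 1)) * back)))
      (now + ((x - prev) * ((pre.length : Int) + 1) * go -
        (x - prev) * (((pre ++ prev :: x :: xs).length : Int) - ((pre.length : Int) + 1)) * back))
    rw [hlen] at this
    rw [show (pre ++ [prev]) ++ x :: xs = pre ++ prev :: x :: xs by simp] at this
    rw [this, pairWalk]

-- the pair walk with now = closed-form cost of the previous position equals B's loop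
theorem pairWalk_eq_altLoop (l : List Int) (l0 t0 n go back : Int)
    (h0 : PySem.List.pyGetD l 0 0 = l0) :
    ∀ (xs : List Int) (j prev P total : Int),
      pairWalk n go back j prev xs total (posCost t0 n go back l0 (j - 1) prev (P - prev))
      = altLoop l t0 n go back (PySem.List.enumerate xs j) P total := by
  intro xs
  induction xs with
  | nil => intro j prev P total; simp [pairWalk, PySem.List.enumerate_nil, altLoop]
  | cons x xs ih =>
    intro j prev P total
    rw [PySem.List.enumerate_cons, pairWalk, altLoop]
    simp only [h0]
    have hstep : posCost t0 n go back l0 (j - 1) prev (P - prev) +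
        ((x - prev) * j * go - (x - prev) * (n - j) * back)
        = t0 + go * (j * x - P) - back * ((n - j) * x + P - n * l0) := by
      unfold posCost; ring
    rw [hstep]
    have hif : (if t0 + go * (j * x - P) - back * ((n - j) * x + P - n * l0) < total
           then t0 + go * (j * x - P) - back * ((n - j) * x + P - n * l0) else total)
        = min total (t0 + go * (j * x - P) - back * ((n - j) * x + P - n * l0)) := by
      rw [min_comm, min_def]
      split_ifs <;> omega
    rw [hif,
      show t0 + go * (j * x - P) - back * ((n - j) * x + P - n * l0)
        = posCost t0 n go back l0 (j + 1 - 1) x (P + x - x) from by unfold posCost; ring]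
    exact ih (j + 1) x (P + x) (min total (posCost t0 n go back l0 (j + 1 - 1) x (P + x - x)))

-- A's initial total equals B's t0
theorem sum_map_eq (base back : Int) :
    ∀ (l : List Int), (l.map (fun num => (num - base) * back)).sum
      = back * (l.sum - (l.length : Int) * base) := by
  intro l
  induction l with
  | nil => simp
  | cons h t ih => simp [ih]; ring

-- ===== VERDICT (by name: the statement is the Claim_ definition above) =====
theorem find_spec : Claim_equal_find := by
  intro l base go back _
  unfold Spec_find find find_alt
  cases l with
  | nil =>
    simp [findGo, altLoop, PySem.List.enumerate_nil]
  | cons h t =>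
    dsimp only
    rw [sum_map_eq]
    have hA := findGo_eq_pairWalk go back t [] h
      (back * ((h :: t).sum - ((h :: t).length : Int) * base))
      (back * ((h :: t).sum - ((h :: t).length : Int) * base))
    simp only [List.nil_append, List.length_nil, Nat.cast_zero, zero_add] at hA
    rw [PySem.List.enumerate_cons, findGo, if_pos rfl]
    simp only [zero_add]
    rw [hA]
    set n : Int := ((h :: t).length : Int) with hn
    set t0 : Int := back * ((h :: t).sum - n * base) with ht0
    have h0 : PySem.List.pyGetD (h :: t) 0 0 = h := by
      simp [PySem.List.pyGetD, PySem.List.pyGet?, PySem.List.pyIdx?]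
    rw [altLoop]
    simp only [h0]
    rw [show t0 + go * (0 * h - 0) - back * ((n - 0) * h + 0 - n * h) = t0 from by ring]
    simp only [lt_irrefl, if_false]
    rw [show (0 : Int) + h = h from by ring]
    have hb := pairWalk_eq_altLoop (h :: t) h t0 n go back h0 t (1 : Int) h h t0
    have hpc : posCost t0 n go back h (1 - 1) h (h - h) = t0 := by unfold posCost; ring
    rw [← hb, hpc]
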